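-- pv_equiv track=rewrite | github.com/SilentWitchy/DungeonDelversV1 | bootstrap.py | scale_8x8_to_16x16
-- ===== SOURCE A (Python) =====
-- def scale_8x8_to_16x16(rows8):
--     # rows8: list of 8 bytes (each 8 bits)
--     # return rows16: list of 16 uint16 (each 16 bits)
--     rows16 = []
--     for r in range(8):
--         b = rows8[r]
--         # expand horizontally 2x: each bit becomes 2 bits
--         out16 = 0
--         for col in range(8):
--             bit = (b >> (7 - col)) & 1
--             if bit:
--                 # set two bits in 16-bit row
--                 out16 |= (1 << (15 - (col*2)))
--                 out16 |= (1 << (15 - (col*2 + 1)))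
--         rows16.append(out16)
--         rows16.append(out16)  # vertical 2x
--     return rows16
-- ===== SOURCE B (Python) =====
-- def scale_8x8_to_16x16(rows8):
--     # rows8: list of 8 bytes; returns 16 uint16 rows (2x scale).
--     # Different strategy: render each byte as an 8-char binary string,
--     # double every character (horizontal 2x), parse it back, append twice (vertical 2x).
--     rows16 = []
--     for r in range(8):
--         s = format(rows8[r] % 256, '08b')   # % 256: only the low 8 bits matter
--         doubled = ''.join(c * 2 for c in s)
--         v = int(doubled, 2)
--         rows16.append(v)
--         rows16.append(v)
--     return rows16
-- ===== Notes on version B (the rewrite author's own statement) =====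
-- stated objective: simpler
-- what changed: Replaces the per-column shift/test/or bit arithmetic with a string-representation expansion: format the byte as an 8-char binary string, double each character, and parse it back.
import Mathlib
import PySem

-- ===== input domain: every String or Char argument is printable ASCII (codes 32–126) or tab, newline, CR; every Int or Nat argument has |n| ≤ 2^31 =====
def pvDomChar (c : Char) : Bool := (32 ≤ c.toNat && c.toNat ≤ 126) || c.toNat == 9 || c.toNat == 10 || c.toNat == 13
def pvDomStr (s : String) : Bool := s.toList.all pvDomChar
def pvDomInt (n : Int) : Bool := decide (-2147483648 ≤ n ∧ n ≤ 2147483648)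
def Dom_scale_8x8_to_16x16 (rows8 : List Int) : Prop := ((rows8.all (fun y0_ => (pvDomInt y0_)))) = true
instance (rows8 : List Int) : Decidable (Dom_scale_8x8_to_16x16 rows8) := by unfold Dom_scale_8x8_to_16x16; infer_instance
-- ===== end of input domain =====

-- B replaces A's per-column shift/test/or arithmetic by a binary-string expansion
-- (format the byte, double each character, parse back); equivalence of the return values.

-- ===== PORT A =====
-- inner loop of A: horizontal 2x expansion of one byte by bit arithmetic
def pvRowA (b : Int) : Int :=
  (PySem.List.pyRange 0 8 1).foldl (fun out16 col =>
    let bit := PySem.Int.band (b >>> (7 - col).toNat) 1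
    if bit ≠ 0 then
      let out16 := PySem.Int.bor out16 (1 <<< (15 - col * 2).toNat)
      PySem.Int.bor out16 (1 <<< (15 - (col * 2 + 1)).toNat)
    else out16) 0

def scale_8x8_to_16x16 (rows8 : List Int) : List Int :=
  (PySem.List.pyRange 0 8 1).foldl (fun rows16 r =>
    -- rows8[r]; Pre_ excludes the IndexError (length < 8), so the default is never used
    let b := (PySem.List.pyGet? rows8 r).getD 0
    let out16 := pvRowA b
    (rows16 ++ [out16]) ++ [out16]) []

-- ===== PORT B =====
-- port of format(n, '08b') for 0 ≤ n: the 8 low bits, most significant first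
def pvBin : Nat → Nat → List Char
  | 0, _ => []
  | k + 1, n => pvBin k (n / 2) ++ [if n % 2 == 1 then '1' else '0']

-- ''.join(c * 2 for c in s)
def pvDouble (s : List Char) : List Char := s.flatMap (fun c => [c, c])

-- int(s, 2) for a string of '0'/'1' characters
def pvParseBin (s : List Char) : Int :=
  s.foldl (fun acc c => 2 * acc + (if c == '1' then 1 else 0)) 0

def pvRowB (b : Int) : Int :=
  pvParseBin (pvDouble (pvBin 8 (PySem.Int.mod b 256).toNat))

def scale_8x8_to_16x16_alt (rows8 : List Int) : List Int :=
  (PySem.List.pyRange 0 8 1).foldl (fun rows16 r =>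
    -- rows8[r]; Pre_ excludes the IndexError (length < 8), so the default is never used
    let v := pvRowB ((PySem.List.pyGet? rows8 r).getD 0)
    (rows16 ++ [v]) ++ [v]) []

-- ===== PRECONDITION & SPEC =====
-- Pre_ excludes exactly the inputs where A raises IndexError (fewer than 8 rows).
def Pre_scale_8x8_to_16x16 (rows8 : List Int) : Prop := 8 ≤ rows8.length
instance (rows8 : List Int) : Decidable (Pre_scale_8x8_to_16x16 rows8) := by
  unfold Pre_scale_8x8_to_16x16; infer_instance

def pvWitness_scale_8x8_to_16x16 : List Int := [0, 1, 2, 3, 4, 5, 6, 255]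

def Spec_scale_8x8_to_16x16 (rows8 : List Int) (out : List Int) : Prop := out = scale_8x8_to_16x16_alt rows8
instance (rows8 : List Int) (out : List Int) : Decidable (Spec_scale_8x8_to_16x16 rows8 out) := by unfold Spec_scale_8x8_to_16x16; infer_instance

-- ===== CLAIM (what is proved, stated in full; the proofs are below) =====
def Claim_equal_scale_8x8_to_16x16 : Prop := ∀ (rows8 : List Int), Dom_scale_8x8_to_16x16 rows8 → Pre_scale_8x8_to_16x16 rows8 → Spec_scale_8x8_to_16x16 rows8 (scale_8x8_to_16x16 rows8)

-- ===== LEMMAS AND PROOFS =====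

-- both row computations only look at the low 8 bits of b
theorem pvRowA_mod (b : Int) : pvRowA b = pvRowA (PySem.Int.mod b 256) := by
  have hbit : ∀ j : Nat, j < 8 →
      PySem.Int.band (b >>> j) 1 = PySem.Int.band (PySem.Int.mod b 256 >>> j) 1 := by
    intro j hj
    rw [PySem.Int.band_one, PySem.Int.band_one,
        PySem.Int.mod_eq_emod_of_pos (by norm_num),
        PySem.Int.mod_eq_emod_of_pos (by norm_num),
        PySem.Int.mod_eq_emod_of_pos (by norm_num),
        Int.shiftRight_eq_div_pow, Int.shiftRight_eq_div_pow]
    interval_cases j <;> norm_num <;> omega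
  have H : ∀ c : Int, 0 ≤ c →
      PySem.Int.band (b >>> (((7 - c).toNat : Nat) : Int)) 1
        = PySem.Int.band (PySem.Int.mod b 256 >>> (((7 - c).toNat : Nat) : Int)) 1 := by
    intro c hc
    rw [Int.shiftRight_natCast_right, Int.shiftRight_natCast_right]
    exact hbit _ (by omega)
  have hr : PySem.List.pyRange 0 8 1 = [0,1,2,3,4,5,6,7] := by decide
  simp only [pvRowA, hr, List.foldl,
    H 0 (by norm_num), H 1 (by norm_num), H 2 (by norm_num), H 3 (by norm_num),
    H 4 (by norm_num), H 5 (by norm_num), H 6 (by norm_num), H 7 (by norm_num)]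

theorem pvRowB_mod (b : Int) : pvRowB b = pvRowB (PySem.Int.mod b 256) := by
  have h : PySem.Int.mod (PySem.Int.mod b 256) 256 = PySem.Int.mod b 256 := by
    rw [PySem.Int.mod_eq_emod_of_pos (by norm_num),
        PySem.Int.mod_eq_emod_of_pos (by norm_num)]
    omega
  unfold pvRowB
  rw [h]

set_option maxRecDepth 4000 in
theorem pvRow_eq_small : ∀ n : Fin 256, pvRowA (n.val : Int) = pvRowB (n.val : Int) := by
  decide

theorem pvRow_eq (b : Int) : pvRowA b = pvRowB b := by
  have hm : 0 ≤ PySem.Int.mod b 256 ∧ PySem.Int.mod b 256 < 256 := by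
    rw [PySem.Int.mod_eq_emod_of_pos (by norm_num)]
    constructor <;> omega
  have hcast : PySem.Int.mod b 256 = (((PySem.Int.mod b 256).toNat : Nat) : Int) := by omega
  rw [pvRowA_mod, pvRowB_mod, hcast]
  exact pvRow_eq_small ⟨(PySem.Int.mod b 256).toNat, by omega⟩

-- ===== VERDICT (by name: the statement is the Claim_ definition above) =====
theorem scale_8x8_to_16x16_spec : Claim_equal_scale_8x8_to_16x16 := by
  intro rows8 _ hpre
  unfold Spec_scale_8x8_to_16x16
  unfold Pre_scale_8x8_to_16x16 at hpre
  rcases rows8 with _ | ⟨x0, _ | ⟨x1, _ | ⟨x2, _ | ⟨x3, _ | ⟨x4, _ | ⟨x5, _ | ⟨x6, _ | ⟨x7, t⟩⟩⟩⟩⟩⟩⟩⟩ <;>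
    simp only [List.length] at hpre <;> try omega
  have hr : PySem.List.pyRange 0 8 1 = [0,1,2,3,4,5,6,7] := by decide
  have ht : (0:Int) ≤ (t.length : Int) := by positivity
  simp [scale_8x8_to_16x16, scale_8x8_to_16x16_alt, hr, List.foldl,
        PySem.List.pyGet?, PySem.List.pyIdx?, pvRow_eq]
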